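-- pv_equiv track=rewrite | github.com/dstalzjohn/flowutils | flowutils/video.py | _format_time_for_ffmpeg
-- ===== SOURCE A (Python) =====
-- def _format_time_for_ffmpeg(time_str: str) -> str:
--     """
--     Converts a flexible time string (e.g., "ss", "mm:ss", "hh:mm:ss")
--     into the "HH:MM:SS" format required by ffmpeg.
--     """
--     time_str = str(time_str)  # Ensure it's a string, in case YAML parsed numbers
--     parts = [int(p) for p in time_str.split(":")]
--
--     if len(parts) == 1:  # seconds
--         h, m, s = 0, 0, parts[0]
--     elif len(parts) == 2:  # minutes:seconds
--         h, m, s = 0, parts[0], parts[1]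
--     elif len(parts) == 3:  # hours:minutes:seconds
--         h, m, s = parts[0], parts[1], parts[2]
--     else:
--         raise ValueError(
--             f"Invalid time format: '{time_str}'. Expected 'ss', 'mm:ss', or 'hh:mm:ss'."
--         )
--     return f"{h:02d}:{m:02d}:{s:02d}"
-- ===== SOURCE B (Python) =====
-- def _format_time_for_ffmpeg(time_str: str) -> str:
--     """
--     Converts a flexible time string (e.g., "ss", "mm:ss", "hh:mm:ss")
--     into the "HH:MM:SS" format required by ffmpeg.
--
--     Builds the result back-to-front: repeatedly splits off the last
--     colon-separated field with rpartition, formatting as it goes, then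
--     prepends "00:" for each missing leading field.
--     """
--     s = str(time_str)
--     result = ""
--     count = 0
--     while True:
--         head, sep, tail = s.rpartition(":")
--         result = f"{int(tail):02d}" + result
--         count += 1
--         if not sep:
--             break
--         result = ":" + result
--         s = head
--     if count > 3:
--         raise ValueError(
--             f"Invalid time format: '{time_str}'. Expected 'ss', 'mm:ss', or 'hh:mm:ss'."
--         )
--     return "00:" * (3 - count) + result
-- ===== Notes on version B (the rewrite author's own statement) =====
-- stated objective: alternative
-- what changed: instead of split-into-a-list plus an if/elif length dispatch, B builds the output string back-to-front, repeatedly rpartition-ing off the last colon-separated field and formatting it, then prepending a zero field for each missing leading field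
import Mathlib
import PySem

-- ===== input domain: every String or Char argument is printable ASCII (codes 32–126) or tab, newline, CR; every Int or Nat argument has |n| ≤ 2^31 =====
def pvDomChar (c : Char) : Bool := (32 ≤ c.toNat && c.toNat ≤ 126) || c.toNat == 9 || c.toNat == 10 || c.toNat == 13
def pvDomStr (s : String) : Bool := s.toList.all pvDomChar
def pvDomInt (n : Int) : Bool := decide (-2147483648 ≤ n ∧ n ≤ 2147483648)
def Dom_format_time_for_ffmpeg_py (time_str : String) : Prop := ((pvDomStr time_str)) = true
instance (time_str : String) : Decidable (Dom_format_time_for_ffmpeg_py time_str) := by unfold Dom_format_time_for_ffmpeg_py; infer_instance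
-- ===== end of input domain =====

-- B builds the output back-to-front: it repeatedly splits off the last colon-separated
-- field with rpartition, formats as it goes, and prepends a zero field for each missing
-- leading field — no parts list, no length-dispatch ladder (objective: alternative).

-- f"{n:02d}" on an int equals str(n).zfill(2) (zero-pad to width 2, sign kept in front): exact.
def pvFmt2 (n : Int) : List Char := PySem.Chars.zfill (PySem.Int.toChars n) 2

-- ===== PORT A =====
def format_time_for_ffmpeg_py (time_str : String) : String :=
  let parts := (PySem.Chars.splitOn time_str.toList [':']).map (fun p => (PySem.Int.ofChars? p).getD 0)
  -- Pre_ guarantees every part parses (getD 0 is never taken) and 1 ≤ len ≤ 3 (no ValueError);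
  -- parts[i] on an index the branch's length test guarantees in range: pyGet? then getD
  if parts.length = 1 then
    String.ofList (pvFmt2 0 ++ ':' :: pvFmt2 0 ++ ':' :: pvFmt2 ((PySem.List.pyGet? parts 0).getD 0))
  else if parts.length = 2 then
    String.ofList (pvFmt2 0 ++ ':' :: pvFmt2 ((PySem.List.pyGet? parts 0).getD 0) ++ ':' :: pvFmt2 ((PySem.List.pyGet? parts 1).getD 0))
  else if parts.length = 3 then
    String.ofList (pvFmt2 ((PySem.List.pyGet? parts 0).getD 0) ++ ':' :: pvFmt2 ((PySem.List.pyGet? parts 1).getD 0) ++ ':' :: pvFmt2 ((PySem.List.pyGet? parts 2).getD 0))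
  else ""  -- Python raises ValueError here; excluded by Pre_

-- ===== PORT B =====
-- s.rpartition(":") ported by hand (PySem has no rpartition), step for step via the reverse:
-- none = no colon (Python's ('', '', s)); some (head, tail) = split at the LAST colon. Exact.
def pvRpart (s : List Char) : Option (List Char × List Char) :=
  match s.reverse.dropWhile (· ≠ ':') with
  | [] => none
  | _ :: rh => some (rh.reverse, (s.reverse.takeWhile (· ≠ ':')).reverse)

-- termination measure for the while loop: the head strictly shrinks
theorem pvRpart_some_length_lt (s hd tl : List Char)
    (h : pvRpart s = some (hd, tl)) : hd.length < s.length := by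
  unfold pvRpart at h
  rcases hdw : s.reverse.dropWhile (· ≠ ':') with _ | ⟨d, rh⟩ <;> rw [hdw] at h
  · simp at h
  · simp only [Option.some.injEq, Prod.mk.injEq] at h
    have hlen : (s.reverse.takeWhile (· ≠ ':')).length + (d :: rh).length = s.reverse.length := by
      rw [← List.length_append, ← hdw, List.takeWhile_append_dropWhile]
    rcases h with ⟨h1, -⟩
    have : hd.length = rh.length := by rw [← h1]; simp
    simp only [List.length_reverse, List.length_cons] at hlen
    omega

-- the while loop of B: (s, result, count) ↦ final (result, count)
def pvFmtGo (s : List Char) (result : List Char) (count : Nat) : List Char × Nat :=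
  match h : pvRpart s with
  | none => (pvFmt2 ((PySem.Int.ofChars? s).getD 0) ++ result, count + 1)
  | some (head, tail) =>
      pvFmtGo head (':' :: (pvFmt2 ((PySem.Int.ofChars? tail).getD 0) ++ result)) (count + 1)
termination_by s.length
decreasing_by exact pvRpart_some_length_lt s head tail h

-- the "00:"-times-n repetition of Source B (pvRep n = "00:" * n)
def pvRep : Nat → List Char
  | 0 => []
  | n + 1 => '0' :: '0' :: ':' :: pvRep n

def format_time_for_ffmpeg_py_alt (time_str : String) : String :=
  let rc := pvFmtGo time_str.toList [] 0
  if 3 < rc.2 then ""  -- Python raises ValueError here; excluded by Pre_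
  else String.ofList (pvRep (3 - rc.2) ++ rc.1)

-- ===== PRECONDITION & SPEC =====
-- Pre_: every colon-separated part parses as a Python int and there are at most 3 of them
-- (exactly where A returns instead of raising ValueError). The 1 ≤ length conjunct excludes
-- nothing: splitting on a nonempty separator always yields at least one piece.
def Pre_format_time_for_ffmpeg_py (time_str : String) : Prop :=
  let parts := PySem.Chars.splitOn time_str.toList [':']
  (∀ p ∈ parts, (PySem.Int.ofChars? p).isSome = true) ∧ 1 ≤ parts.length ∧ parts.length ≤ 3
instance (time_str : String) : Decidable (Pre_format_time_for_ffmpeg_py time_str) := by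
  unfold Pre_format_time_for_ffmpeg_py; infer_instance
def pvWitness_format_time_for_ffmpeg_py : String := "1:2:3"

def Spec_format_time_for_ffmpeg_py (time_str : String) (out : String) : Prop := out = format_time_for_ffmpeg_py_alt time_str
instance (time_str : String) (out : String) : Decidable (Spec_format_time_for_ffmpeg_py time_str out) := by unfold Spec_format_time_for_ffmpeg_py; infer_instance

-- ===== CLAIM (what is proved, stated in full; the proofs are below) =====
def Claim_equal_format_time_for_ffmpeg_py : Prop := ∀ (time_str : String), Dom_format_time_for_ffmpeg_py time_str → Pre_format_time_for_ffmpeg_py time_str → Spec_format_time_for_ffmpeg_py time_str (format_time_for_ffmpeg_py time_str)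

-- ===== LEMMAS AND PROOFS =====

-- a plain structural split on ':' (proof-side reference for both ports)
def pvSplit : List Char → List (List Char)
  | [] => [[]]
  | c :: rest =>
    if c = ':' then [] :: pvSplit rest
    else
      match pvSplit rest with
      | [] => [[c]]
      | p :: ps => (c :: p) :: ps

theorem pvSplit_ne_nil (s : List Char) : pvSplit s ≠ [] := by
  cases s with
  | nil => simp [pvSplit]
  | cons c rest =>
    simp only [pvSplit]
    split
    · simp
    · rcases h : pvSplit rest with _ | ⟨p, ps⟩ <;> simp

-- prepend to the first piece
def pvConsHead (pre : List Char) : List (List Char) → List (List Char)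
  | [] => [pre]
  | p :: ps => (pre ++ p) :: ps

theorem splitOn_go_eq (fuel : Nat) : ∀ (l cur : List Char) (acc : List (List Char)),
    l.length < fuel →
    PySem.Chars.splitOn.go [':'] fuel l cur acc = acc.reverse ++ pvConsHead cur.reverse (pvSplit l) := by
  induction fuel with
  | zero => intro l cur acc h; omega
  | succ n ih =>
    intro l cur acc h
    cases l with
    | nil => simp [PySem.Chars.splitOn.go, pvSplit, pvConsHead]
    | cons c rest =>
      rw [PySem.Chars.splitOn.go]
      by_cases hc : c = ':'
      · have hpre : [':'].isPrefixOf (c :: rest) = true := by simp [List.isPrefixOf, hc]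
        rw [if_pos hpre]
        simp only [List.length_singleton, List.drop_succ_cons, List.drop_zero]
        rw [ih rest [] (cur.reverse :: acc) (by simp at h; omega)]
        rcases hs : pvSplit rest with _ | ⟨p, ps⟩
        · exact absurd hs (pvSplit_ne_nil rest)
        · simp [pvSplit, hc, hs, pvConsHead]
      · have hpre : [':'].isPrefixOf (c :: rest) = false := by
          simp only [List.isPrefixOf, Bool.and_eq_false_iff]
          left
          simp only [beq_eq_false_iff_ne, ne_eq]
          exact fun hb => hc hb.symm
        rw [if_neg (by simp [hpre])]
        rw [ih rest (c :: cur) acc (by simp at h ⊢; omega)]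
        rcases hs : pvSplit rest with _ | ⟨p, ps⟩
        · exact absurd hs (pvSplit_ne_nil rest)
        · simp [pvSplit, hc, hs, pvConsHead]

theorem splitOn_eq_pvSplit (s : List Char) :
    PySem.Chars.splitOn s [':'] = pvSplit s := by
  have := splitOn_go_eq (s.length + 1) s [] [] (by omega)
  rw [PySem.Chars.splitOn, this]
  rcases hs : pvSplit s with _ | ⟨p, ps⟩
  · exact absurd hs (pvSplit_ne_nil s)
  · simp [pvConsHead]

theorem pvSplit_no_colon (s : List Char) (h : ':' ∉ s) : pvSplit s = [s] := by
  induction s with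
  | nil => simp [pvSplit]
  | cons c rest ih =>
    simp only [List.mem_cons, not_or] at h
    simp [pvSplit, Ne.symm h.1, ih h.2]

theorem pvSplit_append_last (a b : List Char) (hb : ':' ∉ b) :
    pvSplit (a ++ ':' :: b) = pvSplit a ++ [b] := by
  induction a with
  | nil => simp [pvSplit, pvSplit_no_colon b hb]
  | cons c rest ih =>
    by_cases hc : c = ':'
    · simp [pvSplit, hc, ih]
    · simp only [List.cons_append, pvSplit, if_neg hc, ih]
      rcases hs : pvSplit rest with _ | ⟨p, ps⟩
      · exact absurd hs (pvSplit_ne_nil rest)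
      · simp

theorem pvRpart_none (s : List Char) (h : pvRpart s = none) : ':' ∉ s := by
  unfold pvRpart at h
  rcases hdw : s.reverse.dropWhile (· ≠ ':') with _ | ⟨d, rh⟩ <;> rw [hdw] at h
  · rw [List.dropWhile_eq_nil_iff] at hdw
    intro hm
    have := hdw ':' (by simpa using hm)
    simp at this
  · simp at h

theorem pvRpart_some (s hd tl : List Char) (h : pvRpart s = some (hd, tl)) :
    s = hd ++ ':' :: tl ∧ ':' ∉ tl := by
  unfold pvRpart at h
  rcases hdw : s.reverse.dropWhile (· ≠ ':') with _ | ⟨d, rh⟩ <;> rw [hdw] at h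
  · simp at h
  · simp only [Option.some.injEq, Prod.mk.injEq] at h
    have hdcolon : d = ':' := by
      have hne : s.reverse.dropWhile (· ≠ ':') ≠ [] := by rw [hdw]; simp
      have h2 := List.head_dropWhile_not (fun x => decide (x ≠ ':')) hne
      simp only [hdw, List.head_cons] at h2
      simpa using h2
    have hsplit : s.reverse = s.reverse.takeWhile (· ≠ ':') ++ d :: rh := by
      conv_lhs => rw [← List.takeWhile_append_dropWhile (p := (· ≠ ':')) (l := s.reverse)]
      rw [hdw]
    constructor
    · have : s = (s.reverse.takeWhile (· ≠ ':') ++ d :: rh).reverse := by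
        rw [← hsplit, List.reverse_reverse]
      rw [this, List.reverse_append, List.reverse_cons]
      simp [← h.1, ← h.2, hdcolon]
    · rw [← h.2]
      intro hm
      have hm' : ':' ∈ s.reverse.takeWhile (· ≠ ':') := by simpa using hm
      have := List.mem_takeWhile_imp hm'
      simp at this

-- formatted join of the pieces, colon-separated (proof-side)
def pvJoinFmt : List (List Char) → List Char
  | [] => []
  | [p] => pvFmt2 ((PySem.Int.ofChars? p).getD 0)
  | p :: q :: ps => pvFmt2 ((PySem.Int.ofChars? p).getD 0) ++ ':' :: pvJoinFmt (q :: ps)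

theorem pvJoinFmt_append_last (p : List Char) (ps : List (List Char)) (b : List Char) :
    pvJoinFmt ((p :: ps) ++ [b]) = pvJoinFmt (p :: ps) ++ ':' :: pvFmt2 ((PySem.Int.ofChars? b).getD 0) := by
  induction ps generalizing p with
  | nil => simp [pvJoinFmt]
  | cons q ps ih =>
    have hq := ih q
    simp only [List.cons_append] at hq ⊢
    simp [pvJoinFmt, hq]

theorem pvFmtGo_spec (s : List Char) (result : List Char) (count : Nat) :
    pvFmtGo s result count = (pvJoinFmt (pvSplit s) ++ result, count + (pvSplit s).length) := by
  rw [pvFmtGo]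
  split
  · next h =>
    have := pvRpart_none s h
    simp [pvSplit_no_colon s this, pvJoinFmt]
  · next hd tl h =>
    obtain ⟨hs, htl⟩ := pvRpart_some s hd tl h
    have hlt := pvRpart_some_length_lt s hd tl h
    rw [pvFmtGo_spec hd (':' :: (pvFmt2 ((PySem.Int.ofChars? tl).getD 0) ++ result)) (count + 1)]
    rw [hs, pvSplit_append_last hd tl htl]
    rcases hps : pvSplit hd with _ | ⟨p, ps⟩
    · exact absurd hps (pvSplit_ne_nil hd)
    · rw [pvJoinFmt_append_last]
      simp only [List.length_append, List.length_cons, List.length_nil, List.append_assoc,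
        List.cons_append, Prod.mk.injEq]
      refine ⟨by trivial, by omega⟩
termination_by s.length
decreasing_by exact hlt

-- ===== VERDICT (by name: the statement is the Claim_ definition above) =====
theorem format_time_for_ffmpeg_py_spec : Claim_equal_format_time_for_ffmpeg_py := by
  intro t _ hpre
  unfold Spec_format_time_for_ffmpeg_py format_time_for_ffmpeg_py format_time_for_ffmpeg_py_alt
  obtain ⟨-, h1, h3⟩ := hpre
  rw [splitOn_eq_pvSplit] at h1 h3
  have h00 : pvFmt2 0 = ['0', '0'] := by decide
  simp only [pvFmtGo_spec t.toList [] 0, splitOn_eq_pvSplit, List.append_nil, Nat.zero_add]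
  match hps : pvSplit t.toList, h1, h3 with
  | [a], _, _ =>
    simp [PySem.List.pyGet?, PySem.List.pyIdx?, pvJoinFmt, pvRep, h00]
  | [a, b], _, _ =>
    simp [PySem.List.pyGet?, PySem.List.pyIdx?, pvJoinFmt, pvRep, h00]
  | [a, b, c], _, _ =>
    simp [PySem.List.pyGet?, PySem.List.pyIdx?, pvJoinFmt, pvRep]
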